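-- pv_equiv track=rewrite | github.com/roslaniecdominik/OrthodromeApp | app.py | radio_errros
-- ===== SOURCE A (Python) =====
-- def radio_errros(form, keys):
--     sign_start_v = None
--     sign_start_h = None
--     sign_end_v = None
--     sign_end_h = None
--
--     for key in keys:
--         try:
--             if key == "start-v":
--                 sign_start_v = form[key]
--             elif key == "start-h":
--                 sign_start_h = form[key]
--             elif key == "end-v":
--                 sign_end_v = form[key]
--             elif key == "end-h":
--                 sign_end_h = form[key]
--         except KeyError:
--             pass
--
--     error_detail = "Mark the directions"
--     return sign_start_v, sign_start_h, sign_end_v, sign_end_h, error_detail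
-- ===== SOURCE B (Python) =====
-- _NAMES = ("start-v", "start-h", "end-v", "end-h")
--
-- def radio_errros(form, keys):
--     vals = tuple(form[n] if (n in keys and n in form) else None for n in _NAMES)
--     return vals + ("Mark the directions",)
-- ===== Notes on version B (the rewrite author's own statement) =====
-- stated objective: idiomatic
-- what changed: B iterates over the four fixed target names with a uniform membership test per name, instead of A's loop over keys with a 4-way if/elif ladder and try/except around dict lookups.
import Mathlib
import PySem

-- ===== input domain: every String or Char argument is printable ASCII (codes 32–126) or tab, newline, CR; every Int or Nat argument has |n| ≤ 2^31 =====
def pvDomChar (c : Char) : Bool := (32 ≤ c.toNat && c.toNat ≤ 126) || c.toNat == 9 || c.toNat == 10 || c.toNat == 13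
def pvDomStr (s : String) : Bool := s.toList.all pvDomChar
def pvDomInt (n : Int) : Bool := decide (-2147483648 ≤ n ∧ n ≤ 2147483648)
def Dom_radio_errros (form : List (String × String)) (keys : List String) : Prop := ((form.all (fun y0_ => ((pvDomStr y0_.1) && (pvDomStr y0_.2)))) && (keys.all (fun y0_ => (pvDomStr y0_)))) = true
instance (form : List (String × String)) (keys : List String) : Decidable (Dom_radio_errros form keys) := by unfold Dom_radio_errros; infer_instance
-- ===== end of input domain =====

-- B replaces A's key loop + if/elif ladder by a per-target-name membership test over the four fixed names (idiomatic; return value identical).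

-- ===== PORT A =====
def pvStepA (form : List (String × String))
    (st : Option String × Option String × Option String × Option String) (key : String) :
    Option String × Option String × Option String × Option String :=
  if key == "start-v" then
    match (PySem.Dict.mk form).get? key with
    | some v => (some v, st.2.1, st.2.2.1, st.2.2.2)
    | none => st
  else if key == "start-h" then
    match (PySem.Dict.mk form).get? key with
    | some v => (st.1, some v, st.2.2.1, st.2.2.2)
    | none => st
  else if key == "end-v" then
    match (PySem.Dict.mk form).get? key with
    | some v => (st.1, st.2.1, some v, st.2.2.2)
    | none => st
  else if key == "end-h" then
    match (PySem.Dict.mk form).get? key with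
    | some v => (st.1, st.2.1, st.2.2.1, some v)
    | none => st
  else st

def radio_errros (form : List (String × String)) (keys : List String) :
    Option String × Option String × Option String × Option String × String :=
  let st := keys.foldl (pvStepA form) (none, none, none, none)
  (st.1, st.2.1, st.2.2.1, st.2.2.2, "Mark the directions")

-- ===== PORT B =====
def pvSlot (form : List (String × String)) (keys : List String) (name : String) : Option String :=
  if keys.contains name && (PySem.Dict.mk form).contains name
  then (PySem.Dict.mk form).get? name else none

def radio_errros_alt (form : List (String × String)) (keys : List String) :
    Option String × Option String × Option String × Option String × String :=
  (pvSlot form keys "start-v", pvSlot form keys "start-h",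
   pvSlot form keys "end-v", pvSlot form keys "end-h", "Mark the directions")

-- ===== PRECONDITION & SPEC =====
def Spec_radio_errros (form : List (String × String)) (keys : List String) (out : Option String × Option String × Option String × Option String × String) : Prop := out = radio_errros_alt form keys
instance (form : List (String × String)) (keys : List String) (out : Option String × Option String × Option String × Option String × String) : Decidable (Spec_radio_errros form keys out) := by unfold Spec_radio_errros; infer_instance

-- ===== CLAIM (what is proved, stated in full; the proofs are below) =====
def Claim_equal_radio_errros : Prop := ∀ (form : List (String × String)) (keys : List String), Dom_radio_errros form keys → Spec_radio_errros form keys (radio_errros form keys)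

-- ===== LEMMAS AND PROOFS =====
-- generalized slot: value of one component after folding `keys` from accumulator `acc`
def pvSlotG (form : List (String × String)) (keys : List String) (name : String) (acc : Option String) : Option String :=
  if keys.contains name && ((PySem.Dict.mk form).get? name).isSome
  then (PySem.Dict.mk form).get? name else acc

lemma foldA_char (form : List (String × String)) (keys : List String) :
    ∀ st : Option String × Option String × Option String × Option String,
      keys.foldl (pvStepA form) st =
        (pvSlotG form keys "start-v" st.1, pvSlotG form keys "start-h" st.2.1,
         pvSlotG form keys "end-v" st.2.2.1, pvSlotG form keys "end-h" st.2.2.2) := by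
  induction keys with
  | nil => intro st; simp [pvSlotG]
  | cons k ks ih =>
    intro st
    simp only [List.foldl_cons, ih]
    by_cases h1 : k = "start-v"
    · subst h1
      simp only [pvStepA, pvSlotG, List.contains_cons]
      cases hg : (PySem.Dict.mk form).get? "start-v" with
      | none => simp
      | some v => simp
    · by_cases h2 : k = "start-h"
      · subst h2
        simp only [pvStepA, pvSlotG, List.contains_cons]
        cases hg : (PySem.Dict.mk form).get? "start-h" with
        | none => simp
        | some v => simp
      · by_cases h3 : k = "end-v"
        · subst h3
          simp only [pvStepA, pvSlotG, List.contains_cons]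
          cases hg : (PySem.Dict.mk form).get? "end-v" with
        | none => simp
        | some v => simp
        · by_cases h4 : k = "end-h"
          · subst h4
            simp only [pvStepA, pvSlotG, List.contains_cons]
            cases hg : (PySem.Dict.mk form).get? "end-h" with
        | none => simp
        | some v => simp
          · simp only [pvStepA, pvSlotG, List.contains_cons]
            simp [h1, h2, h3, h4, Ne.symm h1, Ne.symm h2, Ne.symm h3, Ne.symm h4]

lemma get?_isSome_eq_contains (form : List (String × String)) (name : String) :
    ((PySem.Dict.mk form).get? name).isSome = (PySem.Dict.mk form).contains name := by
  induction form with
  | nil => simp [PySem.Dict.get?, PySem.Dict.contains]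
  | cons p rest ih =>
    obtain ⟨k, v⟩ := p
    rw [PySem.Dict.get?_mk_cons]
    by_cases h : (k == name) = true
    · simp [h, PySem.Dict.contains]
    · simp only [PySem.Dict.contains, List.any_cons] at ih ⊢
      simp [h, ih]

lemma slotG_none (form : List (String × String)) (keys : List String) (name : String) :
    pvSlotG form keys name none = pvSlot form keys name := by
  simp only [pvSlotG, pvSlot, get?_isSome_eq_contains]

-- ===== VERDICT (by name: the statement is the Claim_ definition above) =====
theorem radio_errros_spec : Claim_equal_radio_errros := by
  intro form keys _
  unfold Spec_radio_errros radio_errros radio_errros_alt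
  simp only [foldA_char form keys (none, none, none, none), slotG_none]
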